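-- pv_equiv track=rewrite | github.com/jhonsen/Coding365 | platform/Leetcode/src/split_balanced_string.py | split_balanced_string
-- ===== SOURCE A (Python) =====
-- def split_balanced_string(string):
--     '''
--     Function returns the maximum number of balanced groupings of L & R strings
--     e.g., Input: s = "LLLLRRRR". Outputs 1, because 'LLLLRRRR' is one group
--     '''
--     assert_message = "Input must be a balanced combination of L & R"
--     assert len(set(string)) == 2, assert_message
--     assert string.count(list(set(string))[0]) == string.count(list(set(string))[-1]), assert_message
--
--     total_cnt = 0
--     leader_counter = 0
--
--     ind = 0
--     leader = string[0]
--     while ind < len(string):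
--         if string[ind] == leader:
--             leader_counter += 1
--         else:
--             leader_counter -= 1
--
--         if leader_counter == 0:
--             total_cnt += 1
--
--         ind += 1
--
--     return total_cnt
-- ===== SOURCE B (Python) =====
-- def split_balanced_string(string):
--     '''
--     Returns the number of prefixes of `string` in which the leading character
--     occupies exactly half the positions (= maximal balanced groupings).
--     '''
--     assert_message = "Input must be a balanced combination of L & R"
--     assert len(set(string)) == 2, assert_message
--     assert string.count(list(set(string))[0]) == string.count(list(set(string))[-1]), assert_message
--
--     leader = string[0]
--     return sum(1 for end in range(1, len(string) + 1)
--                if 2 * string[:end].count(leader) == end)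
-- ===== Notes on version B (the rewrite author's own statement) =====
-- stated objective: alternative
-- what changed: Replaces the incremental while-loop that tracks a running leader counter and detects zero crossings with a declarative count over all prefixes of the positions where the leading character occupies exactly half the prefix (2*prefix.count(leader) == len(prefix)).
import Mathlib
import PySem

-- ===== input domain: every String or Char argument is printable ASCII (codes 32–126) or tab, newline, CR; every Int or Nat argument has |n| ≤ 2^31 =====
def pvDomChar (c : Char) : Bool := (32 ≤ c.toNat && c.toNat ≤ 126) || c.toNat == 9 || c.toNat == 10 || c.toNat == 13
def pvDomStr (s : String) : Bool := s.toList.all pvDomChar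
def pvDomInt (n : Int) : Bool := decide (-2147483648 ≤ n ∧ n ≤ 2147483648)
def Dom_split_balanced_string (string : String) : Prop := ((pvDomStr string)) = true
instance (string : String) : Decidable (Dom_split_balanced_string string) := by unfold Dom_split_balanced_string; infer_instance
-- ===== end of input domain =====

-- B counts, over all prefixes, those in which the leading character fills exactly half the
-- positions, instead of A's incremental zero-detecting leader counter (alternative decomposition).


-- ===== PORT A =====
-- while loop over indices 0..len-1 with state (total_cnt, leader_counter), as a foldl over the
-- characters (the loop reads exactly string[ind] at each step).  leader = string[0] exists under Pre_.
def split_balanced_string (string : String) : Int :=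
  let l := string.toList
  let leader := l.headD ' '
  (l.foldl (fun (st : Int × Int) c =>
      let lc := if c = leader then st.2 + 1 else st.2 - 1
      (if lc = 0 then st.1 + 1 else st.1, lc)) ((0 : Int), (0 : Int))).1

-- ===== PORT B =====
-- sum(1 for end in range(1, len(string)+1) if 2*string[:end].count(leader) == end)
-- string[:end].count(leader) is exact as a char count on the sliced character list.
def split_balanced_string_alt (string : String) : Int :=
  let l := string.toList
  let leader := l.headD ' '
  (PySem.List.pyRange 1 ((l.length : Int) + 1) 1).foldl
    (fun (acc : Int) e =>
      if 2 * (((PySem.List.slice l none (some e)).count leader : Int)) = e then acc + 1 else acc)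
    0

-- ===== PRECONDITION & SPEC =====
-- Pre_ = exactly the inputs on which both asserts pass (so A returns): exactly two distinct
-- characters, occurring equally often.  (Python's set order is arbitrary, but the count
-- comparison is symmetric in the two elements, so any order gives the same condition.)
def Pre_split_balanced_string (string : String) : Prop :=
  (PySem.Set.ofList string.toList).length = 2 ∧
  string.toList.count ((PySem.Set.ofList string.toList).headD ' ') =
    string.toList.count ((PySem.Set.ofList string.toList).getLastD ' ')
instance (string : String) : Decidable (Pre_split_balanced_string string) := by
  unfold Pre_split_balanced_string; infer_instance
def pvWitness_split_balanced_string : String := "LLRR"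
def Spec_split_balanced_string (string : String) (out : Int) : Prop := out = split_balanced_string_alt string
instance (string : String) (out : Int) : Decidable (Spec_split_balanced_string string out) := by unfold Spec_split_balanced_string; infer_instance

-- ===== CLAIM (what is proved, stated in full; the proofs are below) =====
def Claim_equal_split_balanced_string : Prop := ∀ (string : String), Dom_split_balanced_string string → Pre_split_balanced_string string → Spec_split_balanced_string string (split_balanced_string string)

-- ===== LEMMAS AND PROOFS =====

-- A's fold, with any start state, counts the prefixes on which the running balance hits zero.
theorem foldA_fst (leader : Char) (l : List Char) (t c : Int) :
    (l.foldl (fun (st : Int × Int) ch =>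
        let lc := if ch = leader then st.2 + 1 else st.2 - 1
        (if lc = 0 then st.1 + 1 else st.1, lc)) (t, c)).1
      = t + ((List.range l.length).countP
          (fun i => decide (c + 2 * (((l.take (i+1)).count leader : Int)) = (i : Int) + 1)) : Int) := by
  induction l generalizing t c with
  | nil => simp
  | cons ch rest ih =>
    simp only [List.foldl_cons, List.length_cons, List.range_succ_eq_map, List.countP_cons,
      List.countP_map]
    rw [ih]
    have hδ : ∀ i : Nat, ((ch :: rest).take (i+1)).count leader
        = (if ch = leader then 1 else 0) + (rest.take i).count leader := by
      intro i
      rw [List.take_succ_cons, List.count_cons]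
      by_cases h : ch = leader <;> simp [h] <;> omega
    have hc' : (if (if ch = leader then c + 1 else c - 1) = 0 then t + 1 else t)
        = t + (if decide (c + 2 * ((((ch :: rest).take (0+1)).count leader : Nat) : Int)
                  = ((0:Nat) : Int) + 1) = true then (1:Int) else 0) := by
      rw [hδ 0]
      simp only [List.take_zero, List.count_nil, Nat.add_zero, decide_eq_true_eq]
      by_cases h : ch = leader <;> (simp [h]; split_ifs <;> omega)
    have hcount : (List.range rest.length).countP
          (fun i => decide ((if ch = leader then c + 1 else c - 1)
            + 2 * (((rest.take (i+1)).count leader : Int)) = (i : Int) + 1))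
        = (List.range rest.length).countP
          ((fun i => decide (c + 2 * ((((ch :: rest).take (i+1)).count leader : Int)) = (i : Int) + 1))
            ∘ Nat.succ) := by
      apply List.countP_congr
      intro i _
      simp only [Function.comp_apply, Nat.succ_eq_add_one, hδ]
      by_cases h : ch = leader <;> simp [h] <;> constructor <;> intro <;> omega
    rw [Nat.cast_add, Nat.cast_ite, Nat.cast_one, Nat.cast_zero, hc', hcount]
    simp only [Nat.cast_zero]
    ring

-- B's fold over range(1, n+1) is the same countP.
theorem foldB_eq (leader : Char) (l : List Char) :
    (PySem.List.pyRange 1 ((l.length : Int) + 1) 1).foldl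
      (fun (acc : Int) e =>
        if 2 * (((PySem.List.slice l none (some e)).count leader : Int)) = e then acc + 1 else acc) 0
      = ((List.range l.length).countP
          (fun i => decide (2 * (((l.take (i+1)).count leader : Int)) = (i : Int) + 1)) : Int) := by
  rw [PySem.List.pyRange_one]
  have hb : ((l.length : Int) + 1 - 1).toNat = l.length := by omega
  rw [hb]
  induction l.length with
  | zero => simp
  | succ n ih =>
    rw [List.range_succ, List.map_append, List.foldl_append, ih, List.countP_append]
    have hsl : PySem.List.slice l none (some (1 + (n : Int))) = l.take (n+1) := by
      have : (1 : Int) + (n : Int) = ((n+1 : Nat) : Int) := by push_cast; ring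
      rw [this, PySem.List.slice_to_natCast]
    simp only [List.map_cons, List.map_nil, List.foldl_cons, List.foldl_nil, List.countP_cons,
      List.countP_nil, hsl]
    by_cases h : 2 * (((l.take (n+1)).count leader : Int)) = (n : Int) + 1
    · have h' : 2 * (((l.take (n+1)).count leader : Int)) = 1 + (n : Int) := by omega
      simp [h]
      omega
    · have h' : ¬ (2 * (((l.take (n+1)).count leader : Int)) = 1 + (n : Int)) := by omega
      simp [h, h']

-- ===== VERDICT (by name: the statement is the Claim_ definition above) =====
theorem split_balanced_string_spec : Claim_equal_split_balanced_string := by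
  intro s _ _
  unfold Spec_split_balanced_string split_balanced_string split_balanced_string_alt
  simp only []
  rw [foldA_fst, foldB_eq]
  norm_num
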